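-- pv_equiv track=rewrite | github.com/teddbug-S/Python-Practical-Projects | Just Practice/flames.py | analyze_names
-- ===== SOURCE A (Python) =====
-- def analyze_names(firstname, lastname):
--     # to analyze we must make sure both strings are same in terms of case.
--     firstname, lastname = list(firstname.strip().lower()), list(lastname.strip().lower())
--     result = dict.fromkeys(firstname, 0)
--     for letter in firstname:
--         if letter in lastname:
--             lastname.remove(letter)
--             result[letter] += 1
--
--     def neutralize_firstname(data, code):
--         for key, value in code.items():
--             for _ in range(value):
--                 data.remove(key)
--         return data
--
--     neutralized_names = neutralize_firstname(firstname, result) + lastname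
--     return len(neutralized_names)
-- ===== SOURCE B (Python) =====
-- def analyze_names(firstname, lastname):
--     # sort both cleaned names, then one merge pass counting unmatched letters
--     a = sorted(firstname.strip().lower())
--     b = sorted(lastname.strip().lower())
--     i = j = leftover = 0
--     while i < len(a) and j < len(b):
--         if a[i] == b[j]:
--             i += 1
--             j += 1
--         elif a[i] < b[j]:
--             leftover += 1
--             i += 1
--         else:
--             leftover += 1
--             j += 1
--     return leftover + (len(a) - i) + (len(b) - j)
-- ===== Notes on version B (the rewrite author's own statement) =====
-- stated objective: faster
-- what changed: Replaces A's nested membership-test/list.remove matching plus a dict-driven second removal pass with sorting both cleaned names once and counting leftovers in a single two-pointer merge pass.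
import Mathlib
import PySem

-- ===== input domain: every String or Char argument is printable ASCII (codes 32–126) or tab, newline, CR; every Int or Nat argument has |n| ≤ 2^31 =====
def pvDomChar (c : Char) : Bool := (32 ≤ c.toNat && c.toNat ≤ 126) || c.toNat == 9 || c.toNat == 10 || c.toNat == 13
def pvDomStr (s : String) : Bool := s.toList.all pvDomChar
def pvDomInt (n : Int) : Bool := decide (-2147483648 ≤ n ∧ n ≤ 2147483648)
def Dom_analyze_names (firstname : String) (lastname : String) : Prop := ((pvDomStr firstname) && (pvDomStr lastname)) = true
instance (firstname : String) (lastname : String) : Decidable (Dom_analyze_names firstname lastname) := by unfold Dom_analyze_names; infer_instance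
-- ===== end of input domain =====

-- B replaces A's nested membership/remove matching (plus the dict-driven second
-- removal pass) with sorting both cleaned names and one two-pointer merge pass.

-- ===== PORT A =====
-- one loop iteration: if letter in lastname: lastname.remove(letter); result[letter] += 1
def pvStep (st : List Char × PySem.Dict Char Int) (letter : Char) :
    List Char × PySem.Dict Char Int :=
  if letter ∈ st.1 then
    ((PySem.List.remove? st.1 letter).getD st.1, st.2.modify letter 0 (· + 1))
  else st

-- inner body of neutralize_firstname: for _ in range(value): data.remove(key)
-- (Python's remove never fails on A's actual state; a failure would keep data unchanged)
def pvRemoveTimes (data : List Char) (kv : Char × Int) : List Char :=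
  (PySem.List.pyRange 0 kv.2 1).foldl (fun d _ => (PySem.List.remove? d kv.1).getD d) data

def analyze_names (firstname : String) (lastname : String) : Int :=
  let f := PySem.Chars.lower (PySem.Chars.strip firstname.toList)
  let l := PySem.Chars.lower (PySem.Chars.strip lastname.toList)
  -- result = dict.fromkeys(firstname, 0)
  let result0 : PySem.Dict Char Int := f.foldl (fun d c => d.insert c 0) PySem.Dict.empty
  let st := f.foldl pvStep (l, result0)
  -- neutralized_names = neutralize_firstname(firstname, result) + lastname
  let neutralized := st.2.items.foldl pvRemoveTimes f
  ((neutralized ++ st.1).length : Int)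

-- ===== PORT B =====
-- the two-pointer while loop of Source B, as recursion on the two sorted lists
def pvMergeCount : List Char → List Char → Int
  | [], ys => (ys.length : Int)
  | x :: xs, [] => ((x :: xs).length : Int)
  | x :: xs, y :: ys =>
    if x = y then pvMergeCount xs ys
    else if x < y then pvMergeCount xs (y :: ys) + 1
    else pvMergeCount (x :: xs) ys + 1

def analyze_names_alt (firstname : String) (lastname : String) : Int :=
  let a := PySem.List.sorted (PySem.Chars.lower (PySem.Chars.strip firstname.toList)) (fun c => c) false
  let b := PySem.List.sorted (PySem.Chars.lower (PySem.Chars.strip lastname.toList)) (fun c => c) false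
  pvMergeCount a b

-- ===== PRECONDITION & SPEC =====
def Spec_analyze_names (firstname : String) (lastname : String) (out : Int) : Prop := out = analyze_names_alt firstname lastname
instance (firstname : String) (lastname : String) (out : Int) : Decidable (Spec_analyze_names firstname lastname out) := by unfold Spec_analyze_names; infer_instance

-- ===== CLAIM (what is proved, stated in full; the proofs are below) =====
def Claim_equal_analyze_names : Prop := ∀ (firstname : String) (lastname : String), Dom_analyze_names firstname lastname → Spec_analyze_names firstname lastname (analyze_names firstname lastname)

-- ===== LEMMAS AND PROOFS =====

-- B side: on sorted lists the merge counts |xs| + |ys| - 2·|xs ∩ ys| (multiset intersection)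
theorem pvMergeCount_eq (xs ys : List Char) (hx : xs.Pairwise (· ≤ ·)) (hy : ys.Pairwise (· ≤ ·)) :
    pvMergeCount xs ys = (xs.length : Int) + ys.length - 2 * (((xs : Multiset Char) ∩ (ys : Multiset Char)).card : Int) := by
  induction xs, ys using pvMergeCount.induct with
  | case1 ys => simp [pvMergeCount]
  | case2 x xs => simp [pvMergeCount]
  | case3 xs y ys ih =>
    have h1 : ((y :: xs : List Char) : Multiset Char) ∩ ((y :: ys : List Char) : Multiset Char)
        = y ::ₘ (((xs : List Char) : Multiset Char) ∩ ((ys : List Char) : Multiset Char)) := by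
      rw [show ((y :: xs : List Char) : Multiset Char) = y ::ₘ (xs : Multiset Char) from rfl,
          show ((y :: ys : List Char) : Multiset Char) = y ::ₘ (ys : Multiset Char) from rfl,
          Multiset.cons_inter_of_pos _ (Multiset.mem_cons_self y _), Multiset.erase_cons_head]
    rw [pvMergeCount, if_pos rfl, ih hx.of_cons hy.of_cons, h1]
    simp only [List.length_cons, Multiset.card_cons]; push_cast; ring
  | case4 x xs y ys hne hlt ih =>
    have hnot : x ∉ ((y :: ys : List Char) : Multiset Char) := by
      intro hmem
      rw [Multiset.mem_coe, List.mem_cons] at hmem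
      rcases hmem with h | h
      · exact hne h
      · exact absurd ((List.pairwise_cons.mp hy).1 x h) (not_le.mpr hlt)
    have h1 : ((x :: xs : List Char) : Multiset Char) ∩ ((y :: ys : List Char) : Multiset Char)
        = ((xs : List Char) : Multiset Char) ∩ ((y :: ys : List Char) : Multiset Char) := by
      rw [show ((x :: xs : List Char) : Multiset Char) = x ::ₘ (xs : Multiset Char) from rfl,
          Multiset.cons_inter_of_neg _ hnot]
    rw [pvMergeCount, if_neg hne, if_pos hlt, ih hx.of_cons hy, h1]
    simp only [List.length_cons]; push_cast; ring
  | case5 x xs y ys hne hnlt ih =>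
    have hylt : y < x := lt_of_le_of_ne (not_lt.mp hnlt) (fun h => hne h.symm)
    have hnot : y ∉ ((x :: xs : List Char) : Multiset Char) := by
      intro hmem
      rw [Multiset.mem_coe, List.mem_cons] at hmem
      rcases hmem with h | h
      · exact (lt_irrefl x) (h ▸ hylt)
      · exact absurd ((List.pairwise_cons.mp hx).1 y h) (not_le.mpr hylt)
    have h1 : ((x :: xs : List Char) : Multiset Char) ∩ ((y :: ys : List Char) : Multiset Char)
        = ((x :: xs : List Char) : Multiset Char) ∩ ((ys : List Char) : Multiset Char) := by
      rw [Multiset.inter_comm,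
          show ((y :: ys : List Char) : Multiset Char) = y ::ₘ (ys : Multiset Char) from rfl,
          Multiset.cons_inter_of_neg _ hnot, Multiset.inter_comm]
    rw [pvMergeCount, if_neg hne, if_neg hnlt, ih hx hy.of_cons, h1]
    simp only [List.length_cons]; push_cast; ring

-- A side, loop: the remaining lastname, as a multiset, is lastname minus firstname
theorem loop_fst (f : List Char) : ∀ (l : List Char) (d : PySem.Dict Char Int),
    ((f.foldl pvStep (l, d)).1 : Multiset Char) = (l : Multiset Char) - (f : Multiset Char) := by
  induction f with
  | nil => intro l d; simp
  | cons a f ih =>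
    intro l d
    by_cases ha : a ∈ l
    · rw [List.foldl_cons, show pvStep (l, d) a
          = (l.erase a, d.modify a 0 (· + 1)) by
            simp [pvStep, ha, PySem.List.remove?_eq_some_erase l a ha]]
      rw [ih]
      rw [show ((a :: f : List Char) : Multiset Char) = a ::ₘ (f : Multiset Char) from rfl,
          Multiset.sub_cons, ← Multiset.coe_erase]
    · rw [List.foldl_cons, show pvStep (l, d) a = (l, d) by simp [pvStep, ha]]
      rw [ih]
      rw [show ((a :: f : List Char) : Multiset Char) = a ::ₘ (f : Multiset Char) from rfl,
          Multiset.sub_cons, Multiset.erase_of_notMem (by simpa using ha)]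

-- A side, loop: the dict counts the matches per letter
theorem loop_getD (f : List Char) : ∀ (l : List Char) (d : PySem.Dict Char Int) (c : Char),
    (f.foldl pvStep (l, d)).2.getD c 0
      = d.getD c 0 + ((((f : Multiset Char) ∩ (l : Multiset Char)).count c : Nat) : Int) := by
  induction f with
  | nil => intro l d c; simp
  | cons a f ih =>
    intro l d c
    by_cases ha : a ∈ l
    · rw [List.foldl_cons, show pvStep (l, d) a
          = (l.erase a, d.modify a 0 (· + 1)) by
            simp [pvStep, ha, PySem.List.remove?_eq_some_erase l a ha]]
      rw [ih]
      rw [show ((a :: f : List Char) : Multiset Char) = a ::ₘ (f : Multiset Char) from rfl,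
          Multiset.cons_inter_of_pos _ (by simpa using ha), Multiset.count_cons,
          PySem.Dict.getD_modify, ← Multiset.coe_erase]
      split_ifs with hca
      · subst hca; push_cast; ring
      · push_cast; ring
    · rw [List.foldl_cons, show pvStep (l, d) a = (l, d) by simp [pvStep, ha]]
      rw [ih,
          show ((a :: f : List Char) : Multiset Char) = a ::ₘ (f : Multiset Char) from rfl,
          Multiset.cons_inter_of_neg _ (by simpa using ha)]

-- A side, loop: keys are untouched when every letter already is a key
theorem loop_keys (f : List Char) : ∀ (l : List Char) (d : PySem.Dict Char Int),
    (∀ c ∈ f, c ∈ d.keys) → (f.foldl pvStep (l, d)).2.keys = d.keys := by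
  induction f with
  | nil => intro l d _; rfl
  | cons a f ih =>
    intro l d hk
    by_cases ha : a ∈ l
    · rw [List.foldl_cons, show pvStep (l, d) a
          = (l.erase a, d.modify a 0 (· + 1)) by
            simp [pvStep, ha, PySem.List.remove?_eq_some_erase l a ha]]
      have hkeys : (d.modify a 0 (· + 1)).keys = d.keys := by
        rw [PySem.Dict.keys_modify, PySem.Dict.keys_insert_of_contains]
        rw [PySem.Dict.contains_eq_decide_mem_keys]
        simp [hk a (by simp)]
      rw [ih _ _ (by rw [hkeys]; exact fun c hc => hk c (List.mem_cons_of_mem _ hc)), hkeys]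
    · rw [List.foldl_cons, show pvStep (l, d) a = (l, d) by simp [pvStep, ha]]
      exact ih _ _ (fun c hc => hk c (List.mem_cons_of_mem _ hc))

-- folding a function that ignores the loop variable is iteration
theorem foldl_const {α β : Type} (g : α → α) (l : List β) (x : α) :
    l.foldl (fun d _ => g d) x = g^[l.length] x := by
  induction l generalizing x with
  | nil => rfl
  | cons a l ih => simp [List.foldl, ih, Function.iterate_succ_apply]

-- removing n ≤ count copies of k, one remove at a time
theorem iter_remove (k : Char) : ∀ (n : Nat) (data : List Char), n ≤ data.count k →
    (((fun d => (PySem.List.remove? d k).getD d)^[n] data : List Char) : Multiset Char)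
      = (data : Multiset Char) - Multiset.replicate n k := by
  intro n
  induction n with
  | zero => intro data _; simp
  | succ n ih =>
    intro data h
    have hmem : k ∈ data := by
      have : 0 < data.count k := lt_of_lt_of_le (Nat.succ_pos n) h
      exact List.count_pos_iff.mp this
    rw [Function.iterate_succ_apply,
        show (PySem.List.remove? data k).getD data = data.erase k by
          rw [PySem.List.remove?_eq_some_erase data k hmem]; rfl]
    rw [ih (data.erase k) (by rw [List.count_erase_self]; omega)]
    rw [← Multiset.coe_erase]
    rw [Multiset.replicate_succ, Multiset.sub_cons]

theorem pvRemoveTimes_eq (k : Char) (n : Nat) (data : List Char) (h : n ≤ data.count k) :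
    ((pvRemoveTimes data (k, (n : Int)) : List Char) : Multiset Char)
      = (data : Multiset Char) - Multiset.replicate n k := by
  rw [pvRemoveTimes, foldl_const, PySem.List.length_pyRange_one]
  simp only [Int.sub_zero, Int.toNat_natCast]
  exact iter_remove k n data h

-- neutralize over pairwise-distinct keys subtracts all the replicates at once
theorem foldl_pvRemoveTimes (ps : List (Char × Int)) : ∀ (data : List Char),
    (ps.map Prod.fst).Nodup →
    (∀ p ∈ ps, ∃ n : Nat, p.2 = (n : Int) ∧ n ≤ data.count p.1) →
    ((ps.foldl pvRemoveTimes data : List Char) : Multiset Char)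
      = (data : Multiset Char) - (ps.map (fun p => Multiset.replicate p.2.toNat p.1)).sum := by
  induction ps with
  | nil => intro data _ _; simp
  | cons p ps ih =>
    intro data hnd hok
    obtain ⟨n, hn, hle⟩ := hok p List.mem_cons_self
    obtain ⟨k, v⟩ := p
    simp only at hn hle
    subst hn
    have hdata' : ((pvRemoveTimes data (k, (n : Int)) : List Char) : Multiset Char)
        = (data : Multiset Char) - Multiset.replicate n k := pvRemoveTimes_eq k n data hle
    rw [List.foldl_cons, ih _ ((List.nodup_cons.mp hnd).2) ?_]
    · rw [hdata', List.map_cons, List.sum_cons]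
      rw [tsub_tsub]
      simp
    · intro q hq
      obtain ⟨m, hm, hml⟩ := hok q (List.mem_cons_of_mem _ hq)
      refine ⟨m, hm, ?_⟩
      have hne : q.1 ≠ k := by
        intro hqk
        have := (List.nodup_cons.mp hnd).1
        exact this (by simpa [hqk] using List.mem_map_of_mem (f := Prod.fst) hq)
      have : ((pvRemoveTimes data (k, (n : Int)) : List Char) : Multiset Char).count q.1
          = (data : Multiset Char).count q.1 := by
        rw [hdata', Multiset.count_sub, Multiset.count_replicate, if_neg (fun h => hne h.symm)]; omega
      simpa using (by omega : (pvRemoveTimes data (k, (n : Int))).count q.1 = data.count q.1 → m ≤ (pvRemoveTimes data (k, (n : Int))).count q.1) (by simpa using this)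

-- a multiset is the sum of its per-key replicates over any distinct key list covering it
theorem sum_replicate_count (ks : List Char) : ∀ (m : Multiset Char), ks.Nodup → (∀ c ∈ m, c ∈ ks) →
    (ks.map (fun k => Multiset.replicate (m.count k) k)).sum = m := by
  induction ks with
  | nil =>
    intro m _ hcov
    have : m = 0 := Multiset.eq_zero_of_forall_notMem (by simpa using hcov)
    simp [this]
  | cons k ks ih =>
    intro m hnd hcov
    have hk : k ∉ ks := (List.nodup_cons.mp hnd).1
    have hnd' : ks.Nodup := (List.nodup_cons.mp hnd).2
    set m' : Multiset Char := m.filter (fun c => ¬ c = k) with hm'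
    have hmap : ks.map (fun c => Multiset.replicate (m.count c) c)
        = ks.map (fun c => Multiset.replicate (m'.count c) c) := by
      apply List.map_congr_left
      intro c hc
      have hck : ¬ c = k := fun h => hk (h ▸ hc)
      rw [hm', Multiset.count_filter]
      simp [hck]
    have hcov' : ∀ c ∈ m', c ∈ ks := by
      intro c hc
      rw [hm', Multiset.mem_filter] at hc
      have := hcov c hc.1
      simp only [List.mem_cons] at this
      rcases this with h | h
      · exact absurd h hc.2
      · exact h
    have hrep : Multiset.replicate (m.count k) k = m.filter (fun c => c = k) := by
      rw [Multiset.filter_eq']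
    calc (List.map (fun c => Multiset.replicate (m.count c) c) (k :: ks)).sum
        = Multiset.replicate (m.count k) k + (ks.map (fun c => Multiset.replicate (m'.count c) c)).sum := by
          simp [hmap]
      _ = m.filter (fun c => c = k) + m' := by rw [hrep, ih m' hnd' hcov']
      _ = m := by rw [hm', Multiset.filter_add_not]

-- dict.fromkeys(f, 0): every value is 0
theorem fromkeys_getD (f : List Char) : ∀ (d : PySem.Dict Char Int) (c : Char),
    (f.foldl (fun d c => d.insert c 0) d).getD c 0 = if c ∈ f then 0 else d.getD c 0 := by
  induction f with
  | nil => simp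
  | cons a f ih =>
    intro d c
    simp only [List.foldl, ih]
    by_cases hc : c ∈ f
    · simp [hc]
    · by_cases hca : c = a
      · subst hca; simp [hc, PySem.Dict.getD_insert_self]
      · rw [if_neg hc, if_neg (show c ∉ a :: f by simp [hca, hc])]
        exact PySem.Dict.getD_insert_of_ne _ _ _ hca

-- the whole computation of A equals the whole computation of B, over the cleaned lists
theorem core (f l : List Char) :
    (((f.foldl pvStep (l, f.foldl (fun d c => d.insert c 0) PySem.Dict.empty)).2.items.foldl pvRemoveTimes f
       ++ (f.foldl pvStep (l, f.foldl (fun d c => d.insert c 0) PySem.Dict.empty)).1).length : Int)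
    = pvMergeCount (PySem.List.sorted f (fun c => c) false) (PySem.List.sorted l (fun c => c) false) := by
  set d0 : PySem.Dict Char Int := f.foldl (fun d c => d.insert c 0) PySem.Dict.empty with hd0
  set st := f.foldl pvStep (l, d0) with hst
  set m : Multiset Char := (f : Multiset Char) ∩ (l : Multiset Char) with hm
  have hmem0 : ∀ c, c ∈ d0.keys ↔ c ∈ f := by
    intro c
    rw [hd0, PySem.Dict.keys_foldl_insert, PySem.Set.mem_update]
    simp [PySem.Dict.keys_empty]
  have hnd0 : d0.keys.Nodup := PySem.Dict.nodup_keys_foldl_insert _ _ _ PySem.Dict.nodup_keys_empty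
  have hkeys : st.2.keys = d0.keys := loop_keys f l d0 (fun c hc => (hmem0 c).mpr hc)
  have hgetD : ∀ c, st.2.getD c 0 = ((m.count c : Nat) : Int) := by
    intro c
    rw [hst, loop_getD, fromkeys_getD, ← hm]
    split_ifs <;> simp [PySem.Dict.getD_empty]
  have hitems : st.2.items = st.2.keys.map (fun c => (c, st.2.getD c 0)) :=
    PySem.Dict.items_eq_map_keys st.2 (hkeys ▸ hnd0) 0
  have hcntle : ∀ c : Char, m.count c ≤ f.count c := by
    intro c
    simp [hm]
  have hneut : ((st.2.items.foldl pvRemoveTimes f : List Char) : Multiset Char)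
      = (f : Multiset Char) - m := by
    rw [hitems]
    rw [foldl_pvRemoveTimes]
    · congr 1
      rw [List.map_map]
      have : (st.2.keys.map ((fun p : Char × Int => Multiset.replicate p.2.toNat p.1) ∘ (fun c => (c, st.2.getD c 0))))
          = st.2.keys.map (fun k => Multiset.replicate (m.count k) k) := by
        apply List.map_congr_left
        intro c _
        simp [hgetD c]
      rw [this]
      apply sum_replicate_count
      · exact hkeys ▸ hnd0
      · intro c hc
        have hcf : c ∈ f := by
          have := Multiset.mem_inter.mp (hm ▸ hc)
          simpa using this.1
        rw [hkeys]
        exact (hmem0 c).mpr hcf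
    · have hfst : (st.2.keys.map (fun c => (c, st.2.getD c 0))).map Prod.fst = st.2.keys := by
        simp [List.map_map, Function.comp_def]
      rw [hfst, hkeys]; exact hnd0
    · intro p hp
      obtain ⟨c, hc, hpc⟩ := List.mem_map.mp hp
      refine ⟨m.count c, ?_, ?_⟩
      · rw [← hpc]; simpa using hgetD c
      · rw [← hpc]; simpa using hcntle c
  have hrest : ((st.1 : List Char) : Multiset Char) = (l : Multiset Char) - (f : Multiset Char) :=
    loop_fst f l d0
  have hsa := PySem.List.sorted_perm f (fun c : Char => c) false
  have hsb := PySem.List.sorted_perm l (fun c : Char => c) false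
  have hB := pvMergeCount_eq (PySem.List.sorted f (fun c => c) false) (PySem.List.sorted l (fun c => c) false)
      (PySem.List.sorted_pairwise f (fun c : Char => c)) (PySem.List.sorted_pairwise l (fun c : Char => c))
  rw [hB, hsa.length_eq, hsb.length_eq,
      Multiset.coe_eq_coe.mpr hsa, Multiset.coe_eq_coe.mpr hsb, ← hm]
  have hmle : m ≤ (f : Multiset Char) := hm ▸ Multiset.inter_le_left
  have h1 : ((f : Multiset Char) - m).card = f.length - m.card := by
    rw [Multiset.card_sub hmle, Multiset.coe_card]
  have h2 : ((l : Multiset Char) - (f : Multiset Char)).card + ((l : Multiset Char) ∩ (f : Multiset Char)).card = l.length := by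
    rw [← Multiset.card_add, Multiset.sub_add_inter, Multiset.coe_card]
  have h3 : ((l : Multiset Char) ∩ (f : Multiset Char)).card = m.card := by
    rw [hm, Multiset.inter_comm]
  have h4 : m.card ≤ f.length := by
    have := Multiset.card_le_card hmle
    simpa using this
  rw [List.length_append]
  have hnl : (st.2.items.foldl pvRemoveTimes f).length = ((f : Multiset Char) - m).card := by
    rw [← hneut, Multiset.coe_card]
  have hrl : st.1.length = ((l : Multiset Char) - (f : Multiset Char)).card := by
    rw [← hrest, Multiset.coe_card]
  rw [hnl, hrl, h1]
  omega

-- ===== VERDICT (by name: the statement is the Claim_ definition above) =====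
theorem analyze_names_spec : Claim_equal_analyze_names := by
  intro firstname lastname _
  unfold Spec_analyze_names analyze_names analyze_names_alt
  exact core _ _
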